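-- pv_equiv track=rewrite | github.com/Heshan-Sandamal/advent-of-code-2025 | Dec-04/puzzle-1.py | get_adj_cells
-- ===== SOURCE A (Python) =====
-- def get_adj_cells(r, c, rows, cols):
--     directions = [(-1, -1), (-1, 0), (-1, 1), (0, -1), (0, 1), (1, -1), (1, 0), (1, 1)]
--     neighbors = []
--     for x, y in directions:
--         adj_x, adj_y = r + x, c + y
--         if ((0 <= adj_x < rows) and (0 <= adj_y < cols)):
--             neighbors.append((adj_x, adj_y))
--     return neighbors
-- ===== SOURCE B (Python) =====
-- def get_adj_cells(r, c, rows, cols):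
--     neighbors = []
--     for adj_x in range(max(0, r - 1), min(rows, r + 2)):
--         for adj_y in range(max(0, c - 1), min(cols, c + 2)):
--             if (adj_x, adj_y) != (r, c):
--                 neighbors.append((adj_x, adj_y))
--     return neighbors
-- ===== Notes on version B (the rewrite author's own statement) =====
-- stated objective: simpler
-- what changed: B drops the 8-offset direction list and the per-cell bounds test, instead baking the grid boundaries into clamped range(max(0,r-1),min(rows,r+2)) x range(max(0,c-1),min(cols,c+2)) loops and skipping only the center cell.
import Mathlib
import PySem

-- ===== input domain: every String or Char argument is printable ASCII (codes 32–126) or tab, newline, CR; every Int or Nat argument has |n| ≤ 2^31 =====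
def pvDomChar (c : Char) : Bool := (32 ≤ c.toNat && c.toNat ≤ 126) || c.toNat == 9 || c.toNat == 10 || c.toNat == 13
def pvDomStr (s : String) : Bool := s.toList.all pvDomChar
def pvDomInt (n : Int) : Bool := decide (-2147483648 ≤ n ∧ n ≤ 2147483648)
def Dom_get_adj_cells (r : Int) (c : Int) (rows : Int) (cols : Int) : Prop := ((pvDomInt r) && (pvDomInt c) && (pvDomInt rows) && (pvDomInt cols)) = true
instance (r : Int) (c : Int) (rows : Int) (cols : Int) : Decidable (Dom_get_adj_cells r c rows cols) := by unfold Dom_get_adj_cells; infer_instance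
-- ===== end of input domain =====

-- B replaces A's 8-offset direction list and per-cell bounds test with clamped nested
-- ranges (the boundaries are baked into the loop limits) that skip only the center cell;
-- objective: simpler. Proved equal to A on all inputs.

-- ===== PORT A =====
def get_adj_cells (r : Int) (c : Int) (rows : Int) (cols : Int) : List (Int × Int) :=
  let directions : List (Int × Int) :=
    [(-1, -1), (-1, 0), (-1, 1), (0, -1), (0, 1), (1, -1), (1, 0), (1, 1)]
  directions.foldl
    (fun neighbors xy =>
      let adj_x := r + xy.1
      let adj_y := c + xy.2
      if (0 ≤ adj_x ∧ adj_x < rows) ∧ (0 ≤ adj_y ∧ adj_y < cols) then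
        neighbors ++ [(adj_x, adj_y)]
      else neighbors)
    []

-- ===== PORT B =====
def get_adj_cells_alt (r : Int) (c : Int) (rows : Int) (cols : Int) : List (Int × Int) :=
  (PySem.List.pyRange (max 0 (r - 1)) (min rows (r + 2)) 1).foldl
    (fun neighbors adj_x =>
      (PySem.List.pyRange (max 0 (c - 1)) (min cols (c + 2)) 1).foldl
        (fun neighbors adj_y =>
          if (adj_x, adj_y) ≠ (r, c) then neighbors ++ [(adj_x, adj_y)]
          else neighbors)
        neighbors)
    []

-- ===== PRECONDITION & SPEC =====
def Spec_get_adj_cells (r : Int) (c : Int) (rows : Int) (cols : Int) (out : List (Int × Int)) : Prop := out = get_adj_cells_alt r c rows cols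
instance (r : Int) (c : Int) (rows : Int) (cols : Int) (out : List (Int × Int)) : Decidable (Spec_get_adj_cells r c rows cols out) := by unfold Spec_get_adj_cells; infer_instance

-- ===== CLAIM (what is proved, stated in full; the proofs are below) =====
def Claim_equal_get_adj_cells : Prop := ∀ (r : Int) (c : Int) (rows : Int) (cols : Int), Dom_get_adj_cells r c rows cols → Spec_get_adj_cells r c rows cols (get_adj_cells r c rows cols)

-- ===== LEMMAS AND PROOFS =====

-- An append-if loop is the flatMap of its per-element contributions.
theorem foldl_ite_app {α β : Type} (P : α → Prop) [DecidablePred P] (f : α → β) (l : List α) (acc : List β) :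
    List.foldl (fun a x => if P x then a ++ [f x] else a) acc l
      = acc ++ l.flatMap (fun x => if P x then [f x] else []) := by
  induction l generalizing acc with
  | nil => simp
  | cons y t ih =>
    simp only [List.foldl_cons, List.flatMap_cons]
    rw [ih]
    split_ifs <;> simp

theorem flatMap_filter' {α β : Type} (p : α → Bool) (g : α → List β) (l : List α) :
    (l.filter p).flatMap g = l.flatMap (fun x => if p x then g x else []) := by
  induction l with
  | nil => simp
  | cons y t ih => by_cases h : p y <;> simp [h, ih]

-- A clamped 3-wide integer range is the bounds-filter of the three candidates.
theorem pyRange_clamp3 (x lo hi : Int) :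
    PySem.List.pyRange (max lo (x - 1)) (min hi (x + 2)) 1
      = [x - 1, x, x + 1].filter (fun t => decide (lo ≤ t ∧ t < hi)) := by
  refine List.Perm.eq_of_pairwise (le := (· < ·))
    (fun a b _ _ h1 h2 => (lt_asymm h1 h2).elim)
    (PySem.List.pairwise_lt_pyRange_one _ _)
    (List.Pairwise.filter _ (by norm_num))
    ((List.perm_ext_iff_of_nodup (PySem.List.nodup_pyRange_one _ _)
      (List.Nodup.filter _ (by norm_num; omega))).mpr ?_)
  intro t
  simp [PySem.List.mem_pyRange_one, List.mem_filter]
  omega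

-- A's loop, written out: eight guarded singletons in row-major order.
theorem get_adj_cells_flat (r c rows cols : Int) :
    get_adj_cells r c rows cols
      = (if (0 ≤ r - 1 ∧ r - 1 < rows) ∧ (0 ≤ c - 1 ∧ c - 1 < cols) then [(r - 1, c - 1)] else [])
        ++ (if (0 ≤ r - 1 ∧ r - 1 < rows) ∧ (0 ≤ c ∧ c < cols) then [(r - 1, c)] else [])
        ++ (if (0 ≤ r - 1 ∧ r - 1 < rows) ∧ (0 ≤ c + 1 ∧ c + 1 < cols) then [(r - 1, c + 1)] else [])
        ++ (if (0 ≤ r ∧ r < rows) ∧ (0 ≤ c - 1 ∧ c - 1 < cols) then [(r, c - 1)] else [])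
        ++ (if (0 ≤ r ∧ r < rows) ∧ (0 ≤ c + 1 ∧ c + 1 < cols) then [(r, c + 1)] else [])
        ++ (if (0 ≤ r + 1 ∧ r + 1 < rows) ∧ (0 ≤ c - 1 ∧ c - 1 < cols) then [(r + 1, c - 1)] else [])
        ++ (if (0 ≤ r + 1 ∧ r + 1 < rows) ∧ (0 ≤ c ∧ c < cols) then [(r + 1, c)] else [])
        ++ (if (0 ≤ r + 1 ∧ r + 1 < rows) ∧ (0 ≤ c + 1 ∧ c + 1 < cols) then [(r + 1, c + 1)] else []) := by
  show List.foldl _ _ _ = _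
  refine (foldl_ite_app
      (P := fun xy : Int × Int => (0 ≤ r + xy.1 ∧ r + xy.1 < rows) ∧ (0 ≤ c + xy.2 ∧ c + xy.2 < cols))
      (f := fun xy : Int × Int => (r + xy.1, c + xy.2)) _ _).trans ?_
  norm_num [List.append_assoc, show r + -1 = r - 1 from by ring, show c + -1 = c - 1 from by ring]

-- B's nested loops, written out: a flatMap over the two clamped ranges.
theorem get_adj_cells_alt_flat (r c rows cols : Int) :
    get_adj_cells_alt r c rows cols
      = (PySem.List.pyRange (max 0 (r - 1)) (min rows (r + 2)) 1).flatMap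
          (fun x => (PySem.List.pyRange (max 0 (c - 1)) (min cols (c + 2)) 1).flatMap
            (fun y => if (x, y) ≠ (r, c) then [(x, y)] else [])) := by
  unfold get_adj_cells_alt
  have hstep : (fun (neighbors : List (Int × Int)) (adj_x : Int) =>
      List.foldl
        (fun neighbors adj_y =>
          if (adj_x, adj_y) ≠ (r, c) then neighbors ++ [(adj_x, adj_y)] else neighbors)
        neighbors (PySem.List.pyRange (max 0 (c - 1)) (min cols (c + 2)) 1))
      = fun neighbors adj_x => neighbors ++
          (PySem.List.pyRange (max 0 (c - 1)) (min cols (c + 2)) 1).flatMap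
            (fun y => if (adj_x, y) ≠ (r, c) then [(adj_x, y)] else []) := by
    funext a x
    exact foldl_ite_app (P := fun y => (x, y) ≠ (r, c)) (f := fun y => (x, y)) _ a
  rw [hstep, PySem.List.foldl_append_eq_flatMap]
  simp

theorem ite_and_nil {β : Type} (p q : Prop) [Decidable p] [Decidable q] (a : List β) :
    (if p ∧ q then a else []) = (if p then (if q then a else []) else []) := by
  split_ifs <;> simp_all

theorem ite_append_nil {β : Type} (p : Prop) [Decidable p] (X Y : List β) :
    (if p then X ++ Y else []) = (if p then X else []) ++ (if p then Y else []) := by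
  split_ifs <;> simp

set_option maxHeartbeats 1000000 in
theorem get_adj_cells_eq_alt (r c rows cols : Int) :
    get_adj_cells r c rows cols = get_adj_cells_alt r c rows cols := by
  rw [get_adj_cells_flat, get_adj_cells_alt_flat,
    pyRange_clamp3 r 0 rows, pyRange_clamp3 c 0 cols]
  simp only [flatMap_filter']
  simp only [List.flatMap_cons, List.flatMap_nil, List.append_nil, decide_eq_true_eq]
  simp [Prod.mk.injEq, show ¬(r - 1 = r) by omega, show ¬(r + 1 = r) by omega,
    show ¬(c - 1 = c) by omega, show ¬(c + 1 = c) by omega, ite_append_nil, ← ite_and_nil,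
    List.append_assoc]

-- ===== VERDICT (by name: the statement is the Claim_ definition above) =====
theorem get_adj_cells_spec : Claim_equal_get_adj_cells := by
  intro r c rows cols _
  exact get_adj_cells_eq_alt r c rows cols
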